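-- pv_equiv track=rewrite | github.com/JAMM-JAMM/algorithm-study | Programmers/PS/level1/폰켓몬.py | solution
-- ===== SOURCE A (Python) =====
-- def solution(nums):
--     p_dict = dict()
--     for num in nums:
--         p_dict[num] = p_dict.get(num, 0) + 1
--     if len(p_dict.keys()) >= (len(nums) // 2):
--         return len(nums) // 2
--     else:
--         return len(p_dict.keys())
-- ===== SOURCE B (Python) =====
-- def solution(nums):
--     s = sorted(nums)
--     distinct = 0
--     prev = None
--     for x in s:
--         if prev is None or x != prev:
--             distinct += 1
--         prev = x
--     return min(distinct, len(nums) // 2)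
-- ===== Notes on version B (the rewrite author's own statement) =====
-- stated objective: alternative
-- what changed: Replaces the hash-dict frequency count and >= branch with a sort-then-scan that counts boundaries between adjacent unequal elements and returns min(distinct, len(nums)//2).
import Mathlib
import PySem

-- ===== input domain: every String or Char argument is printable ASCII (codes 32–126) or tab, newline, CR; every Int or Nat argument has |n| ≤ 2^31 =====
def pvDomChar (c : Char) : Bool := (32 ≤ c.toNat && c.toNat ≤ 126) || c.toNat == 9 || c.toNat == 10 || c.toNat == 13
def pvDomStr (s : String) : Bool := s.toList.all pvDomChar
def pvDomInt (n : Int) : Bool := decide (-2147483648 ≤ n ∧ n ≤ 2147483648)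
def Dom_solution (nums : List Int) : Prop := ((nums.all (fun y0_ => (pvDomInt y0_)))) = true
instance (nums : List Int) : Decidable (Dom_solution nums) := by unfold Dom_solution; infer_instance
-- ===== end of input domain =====

-- B replaces A's hash-dict distinct count with a sort-then-adjacent-scan and a min (alternative decomposition, not faster).

-- ===== PORT A =====
def solution (nums : List Int) : Int :=
  let p_dict := nums.foldl (fun d num => d.insert num (d.getD num 0 + 1))
    (PySem.Dict.empty : PySem.Dict Int Int)
  if (p_dict.keys.length : Int) ≥ PySem.Int.floordiv (nums.length : Int) 2 then
    PySem.Int.floordiv (nums.length : Int) 2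
  else
    (p_dict.keys.length : Int)

-- ===== PORT B =====
def solution_alt (nums : List Int) : Int :=
  let s := PySem.List.sorted nums (fun x => x) false
  let st := s.foldl
    (fun (st : Option Int × Int) x =>
      (some x, if st.1 = some x then st.2 else st.2 + 1))
    (none, 0)
  min st.2 (PySem.Int.floordiv (nums.length : Int) 2)

-- ===== PRECONDITION & SPEC =====
def Spec_solution (nums : List Int) (out : Int) : Prop := out = solution_alt nums
instance (nums : List Int) (out : Int) : Decidable (Spec_solution nums out) := by unfold Spec_solution; infer_instance

-- ===== CLAIM (what is proved, stated in full; the proofs are below) =====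
def Claim_equal_solution : Prop := ∀ (nums : List Int), Dom_solution nums → Spec_solution nums (solution nums)

-- ===== LEMMAS AND PROOFS =====

-- distinct-count of B's scan, as a structural recursion
def cdScan : Option Int → List Int → Int
  | _, [] => 0
  | prev, x :: xs => (if prev = some x then 0 else 1) + cdScan (some x) xs

theorem foldl_cdScan (l : List Int) (prev : Option Int) (c : Int) :
    (l.foldl (fun (st : Option Int × Int) x =>
        (some x, if st.1 = some x then st.2 else st.2 + 1)) (prev, c)).2
      = c + cdScan prev l := by
  induction l generalizing prev c with
  | nil => simp [cdScan]
  | cons x xs ih =>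
    simp only [List.foldl_cons, cdScan]
    rw [ih]
    split <;> ring

theorem card_insert_erase (s : Finset Int) (x : Int) :
    (insert x s).card = (s.erase x).card + 1 := by
  by_cases hx : x ∈ s
  · rw [Finset.insert_eq_self.mpr hx]
    exact (Finset.card_erase_add_one hx).symm
  · rw [Finset.card_insert_of_notMem hx, Finset.erase_eq_of_notMem hx]

theorem cdScan_some (l : List Int) (hs : l.Pairwise (· ≤ ·)) (a : Int)
    (ha : ∀ x ∈ l, a ≤ x) :
    cdScan (some a) l = ((l.toFinset.erase a).card : Int) := by
  induction l generalizing a with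
  | nil => simp [cdScan]
  | cons x xs ih =>
    rcases List.pairwise_cons.mp hs with ⟨hx, hxs⟩
    have hax : a ≤ x := ha x (by simp)
    by_cases hxa : a = x
    · subst hxa
      simp only [cdScan, if_true]
      rw [ih hxs a hx, List.toFinset_cons, Finset.erase_insert_eq_erase]
      ring
    · have hne : (some a : Option Int) ≠ some x := by
        intro h; exact hxa (Option.some_injective _ h)
      simp only [cdScan, if_neg hne]
      rw [ih hxs x hx]
      have halt : a < x := lt_of_le_of_ne hax hxa
      have hnotmem : a ∉ (x :: xs).toFinset := by
        simp only [List.toFinset_cons, Finset.mem_insert, List.mem_toFinset]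
        push Not
        exact ⟨hxa, fun hmem => absurd (hx a hmem) (not_le.mpr halt)⟩
      rw [Finset.erase_eq_of_notMem hnotmem, List.toFinset_cons,
        card_insert_erase]
      push_cast
      ring

theorem cdScan_none (l : List Int) (hs : l.Pairwise (· ≤ ·)) :
    cdScan none l = (l.toFinset.card : Int) := by
  cases l with
  | nil => simp [cdScan]
  | cons x xs =>
    rcases List.pairwise_cons.mp hs with ⟨hx, hxs⟩
    simp only [cdScan, reduceCtorEq, if_false]
    rw [cdScan_some xs hxs x hx, List.toFinset_cons, card_insert_erase]
    push_cast
    ring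

theorem keys_length_eq_card (nums : List Int) :
    (nums.foldl (fun d num => d.insert num (d.getD num 0 + 1))
      (PySem.Dict.empty : PySem.Dict Int Int)).keys.length = nums.toFinset.card := by
  rw [PySem.Dict.foldl_insert_getD_add_one_eq_counter, PySem.Dict.keys_counter]
  have hnd : (PySem.Set.ofList nums).Nodup := PySem.Set.nodup_ofList nums
  have hts : (PySem.Set.ofList nums).toFinset = nums.toFinset := by
    ext y
    simp [PySem.Set.mem_ofList]
  rw [← hts, List.toFinset_card_of_nodup hnd]

-- ===== VERDICT (by name: the statement is the Claim_ definition above) =====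
theorem solution_spec : Claim_equal_solution := by
  intro nums _
  simp only [Spec_solution, solution, solution_alt]
  have hperm := PySem.List.sorted_perm nums (fun x => x) false
  have hpw : (PySem.List.sorted nums (fun x => x) false).Pairwise (· ≤ ·) := by
    simpa using PySem.List.sorted_pairwise nums (fun x => x)
  have hts : (PySem.List.sorted nums (fun x => x) false).toFinset = nums.toFinset := by
    ext y
    simp [hperm.mem_iff]
  rw [foldl_cdScan, cdScan_none _ hpw, hts, keys_length_eq_card]
  simp only [zero_add, ge_iff_le, min_def]
  split_ifs <;> omega
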